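-- pv_equiv track=rewrite | github.com/fanzeng/Leetcode | 1937/1937_Maximum_Number_of_Points_with_Cost.py | maxScorePair
-- ===== SOURCE A (Python) =====
-- def maxScorePair(values):
--     i = 0
--     j = 1
--     s = values[0] + values[1] - 1
--     l = len(values)
--     while j < l:
--         d = j - i
--         s = max(s, values[i] + values[j] - d)
--         if values[i] - d < values[j]:
--             i = j
--         j += 1
--     return s
-- ===== SOURCE B (Python) =====
-- def maxScorePair(values):
--     n = len(values)
--     # pass 1: suf[t] = max over b >= t of values[b] - b (built back-to-front, then reversed)
--     suf = [values[n - 1] - (n - 1)]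
--     for j in range(n - 2, -1, -1):
--         suf.append(max(values[j] - j, suf[-1]))
--     suf.reverse()
--     # pass 2: combine each left endpoint values[a] + a with the best right partner
--     best = values[0] + suf[1]
--     for a in range(1, n - 1):
--         best = max(best, values[a] + a + suf[a + 1])
--     return best
-- ===== Notes on version B (the rewrite author's own statement) =====
-- stated objective: alternative
-- what changed: Replaces A's single-pass two-pointer scan with a two-stage algorithm: first build a suffix-maximum table of values[b]-b back-to-front, then a second pass combines each left endpoint values[a]+a with the best right partner from the table.
import Mathlib
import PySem

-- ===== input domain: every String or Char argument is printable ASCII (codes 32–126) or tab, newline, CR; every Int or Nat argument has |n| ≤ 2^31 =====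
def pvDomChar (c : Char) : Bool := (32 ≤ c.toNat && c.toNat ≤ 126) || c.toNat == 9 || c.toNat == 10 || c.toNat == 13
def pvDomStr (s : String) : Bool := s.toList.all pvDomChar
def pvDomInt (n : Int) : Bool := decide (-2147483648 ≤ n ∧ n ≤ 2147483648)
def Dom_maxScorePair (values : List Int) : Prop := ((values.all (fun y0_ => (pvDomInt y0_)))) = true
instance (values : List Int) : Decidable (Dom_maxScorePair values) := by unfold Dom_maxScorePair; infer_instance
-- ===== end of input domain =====

-- B replaces A's one-pass two-pointer scan by two staged passes: a suffix-maximum table of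
-- values[b]-b built back-to-front, then a combining pass over left endpoints (objective:
-- alternative). Equivalence is on the return value; len < 2 raises IndexError in both
-- Pythons and is excluded by Pre_.

-- ===== PORT A =====
-- A's while loop; i, j are the two pointers (always 0 ≤ i < j in A, so the .getD 0
-- defaults on pyGet? are never reached on inputs satisfying Pre_).
def maxScorePairLoopA (values : List Int) (i j : Nat) (s : Int) : Int :=
  if _h : j < values.length then
    let vi := (PySem.List.pyGet? values (i : Int)).getD 0
    let vj := (PySem.List.pyGet? values (j : Int)).getD 0
    let d : Int := (j : Int) - (i : Int)
    let s' := max s (vi + vj - d)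
    let i' := if vi - d < vj then j else i
    maxScorePairLoopA values i' (j + 1) s'
  else s
termination_by values.length - j

def maxScorePair (values : List Int) : Int :=
  let s := (PySem.List.pyGet? values 0).getD 0 + (PySem.List.pyGet? values 1).getD 0 - 1
  maxScorePairLoopA values 0 1 s

-- ===== PORT B =====
-- Source B: pass 1 appends `max(values[j]-j, suf[-1])` over range(n-2, -1, -1) and reverses
-- (`suf.reverse()` mutates Source B's local list only), pass 2 folds over range(1, n-1).
def maxScorePair_alt (values : List Int) : Int :=
  let n := values.length
  let suf0 : List Int := [(PySem.List.pyGet? values ((n : Int) - 1)).getD 0 - ((n : Int) - 1)]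
  let suf :=
    ((PySem.List.pyRange ((n : Int) - 2) (-1) (-1)).foldl
      (fun suf j =>
        suf ++ [max ((PySem.List.pyGet? values j).getD 0 - j) ((PySem.List.pyGet? suf (-1)).getD 0)])
      suf0).reverse
  let best := (PySem.List.pyGet? values 0).getD 0 + (PySem.List.pyGet? suf 1).getD 0
  (PySem.List.pyRange 1 ((n : Int) - 1) 1).foldl
    (fun best a =>
      max best ((PySem.List.pyGet? values a).getD 0 + a + (PySem.List.pyGet? suf (a + 1)).getD 0))
    best

-- ===== PRECONDITION & SPEC =====
-- Pre_ excludes lists of length < 2, on which both Pythons raise IndexError.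
def Pre_maxScorePair (values : List Int) : Prop := 2 ≤ values.length
instance (values : List Int) : Decidable (Pre_maxScorePair values) := by unfold Pre_maxScorePair; infer_instance
def pvWitness_maxScorePair : List Int := [3, 1, 4]

def Spec_maxScorePair (values : List Int) (out : Int) : Prop := out = maxScorePair_alt values
instance (values : List Int) (out : Int) : Decidable (Spec_maxScorePair values out) := by unfold Spec_maxScorePair; infer_instance

-- ===== CLAIM (what is proved, stated in full; the proofs are below) =====
def Claim_equal_maxScorePair : Prop := ∀ (values : List Int), Dom_maxScorePair values → Pre_maxScorePair values → Spec_maxScorePair values (maxScorePair values)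

-- ===== LEMMAS AND PROOFS =====

-- `values[k]` for an in-range Nat index, and the pair score (values[a]+a) + (values[b]-b).
def gv (values : List Int) (k : Nat) : Int := (values[k]?).getD 0
def pr (values : List Int) (a b : Nat) : Int := gv values a + a + (gv values b - b)

-- Proof-only reference loop: prefix-maximum formulation of A's scan.
def loopP (values : List Int) (j : Nat) (s best : Int) : Int :=
  if _h : j < values.length then
    loopP values (j + 1) (max s (best + (gv values j - j))) (max best (gv values j + j))
  else s
termination_by values.length - j

-- Suffix maxima of values[b]-b, the quantity B's first pass tabulates.
def sufAt (values : List Int) (a : Nat) : Int :=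
  if _h : a + 1 < values.length then max (gv values a - a) (sufAt values (a + 1))
  else gv values a - a
termination_by values.length - a

def rowTerm (values : List Int) (a : Nat) : Int := gv values a + a + sufAt values (a + 1)

-- All pair scores grouped by right endpoint (A's traversal) resp. left endpoint (B's).
def colsList (values : List Int) : List Int :=
  (List.range' 1 (values.length - 1)).flatMap fun t => (List.range t).map fun k => pr values k t
def rowsList (values : List Int) : List Int :=
  (List.range' 0 (values.length - 1)).flatMap fun a =>
    (List.range' (a + 1) (values.length - 1 - a)).map fun b => pr values a b

lemma pyGet_gv (values : List Int) (k : Nat) :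
    (PySem.List.pyGet? values (k : Int)).getD 0 = gv values k := by
  simp [PySem.List.pyGet?_natCast, gv]

lemma sufAt_rec (values : List Int) (a : Nat) (h : a + 1 < values.length) :
    sufAt values a = max (gv values a - a) (sufAt values (a + 1)) := by
  rw [sufAt]; simp [h]

-- A's two-pointer loop equals the prefix-maximum loop: the pointer i always carries
-- the running maximum of values[k]+k.
lemma loopA_eq_loopP (values : List Int) :
    ∀ n j i s, i < j → j ≤ values.length → n = values.length - j →
      maxScorePairLoopA values i j s = loopP values j s (gv values i + i) := by
  intro n
  induction n with
  | zero =>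
    intro j i s hij hjl hn
    have hj : ¬ j < values.length := by omega
    rw [maxScorePairLoopA, loopP]
    simp [hj]
  | succ m ih =>
    intro j i s hij hjl hn
    have hj : j < values.length := by omega
    rw [maxScorePairLoopA, loopP]
    simp only [hj, dif_pos, pyGet_gv]
    set vi := gv values i with hvi
    set vj := gv values j with hvj
    have hs : max s (vi + vj - ((j : Int) - (i : Int)))
        = max s (vi + (i : Int) + (vj - (j : Int))) := by
      congr 1; ring
    rw [ih (j + 1) _ _ (by by_cases hc : vi - ((j : Int) - (i : Int)) < vj <;> simp [hc]; omega)
        (by omega) (by omega), hs]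
    congr 1
    by_cases hc : vi - ((j : Int) - (i : Int)) < vj
    · simp only [hc, if_pos, ← hvj]
      have : vi + (i : Int) ≤ vj + (j : Int) := by omega
      omega
    · simp only [hc, if_neg, not_false_iff, ← hvi]
      have : vj + (j : Int) ≤ vi + (i : Int) := by omega
      omega

-- Closed form of the prefix-maximum loop: fold of the per-right-endpoint column maxima.
lemma loopP_closed (values : List Int) :
    ∀ m j s best, j ≤ values.length → m = values.length - j →
      loopP values j s best =
        List.foldl max s ((List.range' j (values.length - j)).map fun t =>
          List.foldl max (best + (gv values t - t))
            ((List.range' j (t - j)).map fun k => pr values k t)) := by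
  intro m
  induction m with
  | zero =>
    intro j s best hjl hm
    have hj : ¬ j < values.length := by omega
    rw [loopP]
    simp [hj, show values.length - j = 0 by omega]
  | succ m ih =>
    intro j s best hjl hm
    have hj : j < values.length := by omega
    rw [loopP]
    simp only [hj, dif_pos]
    rw [ih (j + 1) _ _ (by omega) (by omega)]
    rw [show values.length - j = (values.length - (j + 1)) + 1 by omega, List.range'_succ,
      List.map_cons, List.foldl_cons]
    rw [show j - j = 0 from Nat.sub_self j, List.range'_zero, List.map_nil, List.foldl_nil]
    congr 1
    apply List.map_congr_left
    intro t ht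
    have htj : j + 1 ≤ t := (List.mem_range'_1.mp ht).1
    rw [show t - j = (t - (j + 1)) + 1 by omega, List.range'_succ, List.map_cons,
      List.foldl_cons]
    congr 1
    rw [← max_add_add_right]
    congr 1
    try simp [pr]

-- fold-of-folds flattens to a fold over the concatenation.
lemma foldl_max_flatten (h : Nat → Int) (g : Nat → List Int) (l : List Nat) :
    ∀ s : Int, List.foldl max s (l.map fun t => List.foldl max (h t) (g t)) =
      List.foldl max s (l.flatMap fun t => h t :: g t) := by
  induction l with
  | nil => intro s; rfl
  | cons t l ih =>
    intro s
    simp only [List.map_cons, List.foldl_cons, List.flatMap_cons, List.cons_append,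
      List.foldl_append]
    rw [← List.foldl_assoc (op := max), ih]

lemma foldl_max_add_left (c : Int) : ∀ (l : List Int) (x : Int),
    c + List.foldl max x l = List.foldl max (c + x) (l.map (c + ·)) := by
  intro l
  induction l with
  | nil => intro x; rfl
  | cons a l ih =>
    intro x
    simp only [List.foldl_cons, List.map_cons]
    rw [max_add_add_left, ih]

-- B's first pass builds exactly the suffix-maximum table.
lemma suf_build (values : List Int) (hn : 2 ≤ values.length) :
    ∀ m, m ≤ values.length - 1 →
      (List.range m).foldl
        (fun suf (k : Nat) =>
          suf ++ [max ((PySem.List.pyGet? values ((values.length : Int) - 2 - (k : Int))).getD 0 -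
                ((values.length : Int) - 2 - (k : Int))) ((PySem.List.pyGet? suf (-1)).getD 0)])
        [sufAt values (values.length - 1)]
      = ((List.range' (values.length - 1 - m) (m + 1)).map (sufAt values)).reverse := by
  intro m
  induction m with
  | zero => simp
  | succ m ih =>
    intro hm
    have e1 : values.length - 1 - m + 1 = values.length - m := by omega
    have e2 : values.length - 1 - (m + 1) = values.length - 2 - m := by omega
    have e3 : values.length - 2 - m + 1 = values.length - 1 - m := by omega
    rw [List.range_succ, List.foldl_append, ih (by omega), List.foldl_cons, List.foldl_nil]
    rw [show (values.length : Int) - 2 - (m : Int) = ((values.length - 2 - m : Nat) : Int) by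
      omega]
    rw [pyGet_gv, PySem.List.pyGet?_neg_one, List.getLast?_reverse]
    rw [List.range'_succ, e1, List.map_cons, List.head?_cons, Option.getD_some]
    rw [e2, List.range'_succ, e3, List.map_cons, List.reverse_cons]
    rw [List.range'_succ, e1, List.map_cons]
    rw [sufAt_rec values (values.length - 2 - m) (by omega), e3]
    simp [List.reverse_cons]

lemma sufAt_closed (values : List Int) :
    ∀ m a, a < values.length → m = values.length - 1 - a →
      sufAt values a =
        List.foldl max (gv values a - a)
          ((List.range' (a + 1) (values.length - 1 - a)).map fun b => gv values b - b) := by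
  intro m
  induction m with
  | zero =>
    intro a ha hm
    rw [sufAt]
    simp [show ¬ (a + 1 < values.length) by omega, show values.length - 1 - a = 0 by omega]
  | succ m ih =>
    intro a ha hm
    have h1 : a + 1 < values.length := by omega
    rw [sufAt]
    simp only [h1, dif_pos]
    rw [ih (a + 1) (by omega) (by omega)]
    rw [show values.length - 1 - a = (values.length - 1 - (a + 1)) + 1 by omega,
      List.range'_succ, List.map_cons, List.foldl_cons, List.foldl_assoc (op := max)]

-- The column maximum over left endpoints a < t < n, as B's row terms see it.
lemma rowTerm_closed (values : List Int) (a : Nat) (h : a + 1 < values.length) :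
    rowTerm values a =
      List.foldl max (pr values a (a + 1))
        ((List.range' (a + 2) (values.length - 2 - a)).map fun b => pr values a b) := by
  rw [rowTerm, sufAt_closed values (values.length - 1 - (a + 1)) (a + 1) h rfl]
  rw [foldl_max_add_left (gv values a + a), List.map_map]
  rw [show values.length - 1 - (a + 1) = values.length - 2 - a by omega]
  rfl

-- The two enumerations of the index pairs {(k,t) : k < t < n} are permutations.
lemma pairs_perm (n : Nat) :
    ((List.range' 1 (n - 1)).flatMap fun t => (List.range t).map fun k => (k, t)).Perm
      ((List.range' 0 (n - 1)).flatMap fun a =>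
        (List.range' (a + 1) (n - 1 - a)).map fun b => (a, b)) := by
  have h1 : ((List.range' 1 (n - 1)).flatMap fun t =>
      (List.range t).map fun k => (k, t)).Nodup := by
    rw [List.nodup_flatMap]
    refine ⟨fun t _ => List.Nodup.map (fun a b h => by simpa using h) List.nodup_range, ?_⟩
    refine List.Pairwise.imp ?_ (List.pairwise_lt_range' 1)
    intro t t' hlt p hp hp'
    simp only [List.mem_map] at hp hp'
    obtain ⟨k, _, rfl⟩ := hp
    obtain ⟨k', _, h⟩ := hp'
    exact absurd (congrArg Prod.snd h).symm (by simp; omega)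
  have h2 : ((List.range' 0 (n - 1)).flatMap fun a =>
      (List.range' (a + 1) (n - 1 - a)).map fun b => (a, b)).Nodup := by
    rw [List.nodup_flatMap]
    refine ⟨fun a _ => List.Nodup.map (fun x y h => by simpa using h) List.nodup_range', ?_⟩
    refine List.Pairwise.imp ?_ (List.pairwise_lt_range' 1)
    intro a a' hlt p hp hp'
    simp only [List.mem_map] at hp hp'
    obtain ⟨b, _, rfl⟩ := hp
    obtain ⟨b', _, h⟩ := hp'
    exact absurd (congrArg Prod.fst h).symm (by simp; omega)
  rw [List.perm_ext_iff_of_nodup h1 h2]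
  rintro ⟨k, t⟩
  simp only [List.mem_flatMap, List.mem_map, List.mem_range, List.mem_range'_1, Prod.mk.injEq]
  constructor
  · rintro ⟨t', ⟨ha, hb⟩, k', hk', hEq1, hEq2⟩
    exact ⟨k, ⟨by omega, by omega⟩, t, ⟨by omega, by omega⟩, rfl, rfl⟩
  · rintro ⟨a, ⟨ha, hb⟩, b, ⟨hb1, hb2⟩, hEq1, hEq2⟩
    exact ⟨t, ⟨by omega, by omega⟩, k, by omega, rfl, rfl⟩

lemma A_eq_cols (values : List Int) (hn : 2 ≤ values.length) :
    maxScorePair values = List.foldl max (pr values 0 1) (colsList values) := by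
  have h0 : (PySem.List.pyGet? values (0 : Int)).getD 0 = gv values 0 := by
    simpa using pyGet_gv values 0
  have h1 : (PySem.List.pyGet? values (1 : Int)).getD 0 = gv values 1 := by
    simpa using pyGet_gv values 1
  simp only [maxScorePair]
  rw [loopA_eq_loopP values (values.length - 1) 1 0 _ (by omega) (by omega) (by omega)]
  rw [loopP_closed values (values.length - 1) 1 _ _ (by omega) (by omega)]
  rw [h0, h1, foldl_max_flatten]
  rw [show gv values 0 + gv values 1 - 1 = pr values 0 1 by unfold pr; push_cast; ring]
  congr 1
  simp only [colsList]
  refine (List.flatMap_congr fun t ht => ?_).symm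
  have h1t : 1 ≤ t := (List.mem_range'_1.mp ht).1
  obtain ⟨u, rfl⟩ : ∃ u, t = u + 1 := ⟨t - 1, by omega⟩
  rw [List.range_eq_range', List.range'_succ, List.map_cons]
  simp [pr]

lemma B_eq_rows (values : List Int) (hn : 2 ≤ values.length) :
    maxScorePair_alt values = List.foldl max (pr values 0 1) (rowsList values) := by
  have hL : values.length - 1 - (values.length - 1) = 0 := by omega
  simp only [maxScorePair_alt]
  -- pass 1: the built list is the suffix-maximum table
  rw [show (PySem.List.pyGet? values ((values.length : Int) - 1)).getD 0 -
        ((values.length : Int) - 1)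
      = sufAt values (values.length - 1) by
    rw [show (values.length : Int) - 1 = ((values.length - 1 : Nat) : Int) by omega, pyGet_gv,
      sufAt, dif_neg (by omega)]]
  rw [PySem.List.pyRange_neg_one,
    show ((values.length : Int) - 2 - (-1)).toNat = values.length - 1 by omega,
    List.foldl_map, suf_build values hn (values.length - 1) le_rfl, hL,
    show values.length - 1 + 1 = values.length by omega, List.reverse_reverse]
  -- pass 2
  rw [PySem.List.pyRange_one, show ((values.length : Int) - 1 - 1).toNat = values.length - 2 by
    omega, List.foldl_map]
  rw [show (PySem.List.pyGet? values (0 : Int)).getD 0 = gv values 0 by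
    simpa using pyGet_gv values 0]
  rw [show (PySem.List.pyGet?
        ((List.range' 0 values.length).map (sufAt values)) (1 : Int)).getD 0
      = sufAt values 1 by
    rw [show (1 : Int) = ((1 : Nat) : Int) by simp,
      PySem.List.pyGet?_ofNat _ 1 (by simp; omega)]
    simp [List.getElem_map, List.getElem_range']]
  rw [PySem.List.foldl_congr_mem _ _
      (fun best (k : Nat) => max best (rowTerm values (k + 1))) _ ?_]
  · -- fold over Nat range with rowTerm
    rw [show gv values 0 + sufAt values 1 = rowTerm values 0 by simp [rowTerm]]
    rw [show (List.foldl (fun best k => max best (rowTerm values (k + 1))) (rowTerm values 0)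
          (List.range (values.length - 2)))
        = List.foldl max (rowTerm values 0)
            (((List.range (values.length - 2)).map fun k => rowTerm values (k + 1)))
      from List.foldl_map.symm]
    rw [show ((List.range (values.length - 2)).map fun k => rowTerm values (k + 1))
        = (List.range' 1 (values.length - 2)).map (rowTerm values) by
      rw [List.range'_eq_map_range, List.map_map]
      exact (List.map_congr_left fun k _ => by simp [Nat.add_comm]).symm]
    -- replace every rowTerm by its column fold
    rw [List.map_congr_left (fun a ha => rowTerm_closed values a
      (by have := (List.mem_range'_1.mp ha); omega))]
    rw [rowTerm_closed values 0 (by omega)]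
    rw [foldl_max_flatten, ← List.foldl_append]
    norm_num
    -- match rowsList
    rw [show rowsList values
        = pr values 0 1 ::
            (((List.range' 2 (values.length - 2)).map fun b => pr values 0 b) ++
              ((List.range' 1 (values.length - 2)).flatMap fun a =>
                pr values a (a + 1) ::
                  ((List.range' (a + 2) (values.length - 2 - a)).map fun b => pr values a b)))
      from ?_]
    · rw [List.foldl_cons, max_self, List.foldl_append]
    · have houter : List.range' 0 (values.length - 1) = 0 :: List.range' 1 (values.length - 2) := by
        rw [show values.length - 1 = (values.length - 2) + 1 by omega, List.range'_succ]
      have hhead : List.range' (0 + 1) (values.length - 1 - 0)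
          = 1 :: List.range' 2 (values.length - 2) := by
        rw [show values.length - 1 - 0 = (values.length - 2) + 1 by omega, List.range'_succ]
      rw [rowsList, houter, List.flatMap_cons, hhead, List.map_cons, List.cons_append]
      congr 2
      refine List.flatMap_congr fun a ha => ?_
      have h1a := List.mem_range'_1.mp ha
      rw [show values.length - 1 - a = (values.length - 2 - a) + 1 by omega, List.range'_succ,
        List.map_cons]
  · -- pointwise rewrite of the fold body
    intro best k hk
    have hk2 : k < values.length - 2 := List.mem_range.mp hk
    congr 1
    rw [show (1 : Int) + (k : Int) = ((k + 1 : Nat) : Int) by omega, pyGet_gv]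
    rw [show ((k + 1 : Nat) : Int) + 1 = ((k + 2 : Nat) : Int) by omega]
    rw [show (PySem.List.pyGet?
          ((List.range' 0 values.length).map (sufAt values)) ((k + 2 : Nat) : Int)).getD 0
        = sufAt values (k + 2) by
      rw [PySem.List.pyGet?_ofNat _ (k + 2) (by simp; omega)]
      simp [List.getElem_map, List.getElem_range']]
    rw [rowTerm]

lemma cols_perm_rows (values : List Int) : (colsList values).Perm (rowsList values) := by
  have hc : colsList values
      = (((List.range' 1 (values.length - 1)).flatMap fun t =>
          (List.range t).map fun k => (k, t)).map fun p => pr values p.1 p.2) := by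
    rw [List.map_flatMap]
    exact List.flatMap_congr fun t _ => by rw [List.map_map]; rfl
  have hr : rowsList values
      = (((List.range' 0 (values.length - 1)).flatMap fun a =>
          (List.range' (a + 1) (values.length - 1 - a)).map fun b => (a, b)).map
            fun p => pr values p.1 p.2) := by
    rw [List.map_flatMap]
    exact List.flatMap_congr fun a _ => by rw [List.map_map]; rfl
  rw [hc, hr]
  exact (pairs_perm values.length).map _

-- ===== VERDICT (by name: the statement is the Claim_ definition above) =====
theorem maxScorePair_spec : Claim_equal_maxScorePair := by
  intro values _hdom hpre
  unfold Spec_maxScorePair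
  rw [A_eq_cols values hpre, B_eq_rows values hpre,
    (cols_perm_rows values).foldl_eq (pr values 0 1)]
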